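-- pv_equiv track=rewrite | github.com/AyayaXiaowang/Ayaya_Miliastra_Editor | private_extensions/ugc_file_tools/save_patchers/player_templates.py | _parse_human_players
-- ===== SOURCE A (Python) =====
-- from typing import Any, Dict, Iterable, List, Optional, Tuple
--
-- def _parse_human_players(players: Iterable[int]) -> Tuple[int, ...]:
--     out: List[int] = []
--     for p in players:
--         if not isinstance(p, int):
--             raise ValueError(f"player index must be int: {p!r}")
--         if not (1 <= int(p) <= 8):
--             raise ValueError(f"player must be in 1..8: {p!r}")
--         out.append(int(p) - 1)
--     return tuple(sorted(set(out)))
-- ===== SOURCE B (Python) =====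
-- def _parse_human_players(players):
--     players = list(players)
--     for p in players:
--         if not isinstance(p, int):
--             raise ValueError(f"player index must be int: {p!r}")
--         if not (1 <= int(p) <= 8):
--             raise ValueError(f"player must be in 1..8: {p!r}")
--     return tuple(v - 1 for v in range(1, 9) if v in players)
-- ===== Notes on version B (the rewrite author's own statement) =====
-- stated objective: alternative
-- what changed: Instead of accumulating coerced values and computing sorted(set(out)), B only validates in a first pass and then builds the result by scanning the fixed domain range(1,9) and keeping each value present in the input, so no set and no sort exist; the result is sorted and deduplicated by construction of the domain scan.
import Mathlib
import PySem

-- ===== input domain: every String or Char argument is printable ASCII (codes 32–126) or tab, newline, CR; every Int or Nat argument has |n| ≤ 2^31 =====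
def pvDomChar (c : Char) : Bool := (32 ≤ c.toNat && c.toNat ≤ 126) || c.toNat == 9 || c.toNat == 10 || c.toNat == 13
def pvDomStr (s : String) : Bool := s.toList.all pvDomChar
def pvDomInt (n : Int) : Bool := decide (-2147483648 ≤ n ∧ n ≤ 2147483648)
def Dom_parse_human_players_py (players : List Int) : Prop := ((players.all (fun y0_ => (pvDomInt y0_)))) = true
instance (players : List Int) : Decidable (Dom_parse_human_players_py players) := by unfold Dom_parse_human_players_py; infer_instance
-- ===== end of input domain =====

-- B validates in a pass that accumulates nothing, then scans the fixed domain 1..8 keeping values present in the input (sorted/deduplicated by construction), replacing A's sorted(set(...)) (alternative algorithm, no sort, no set).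


-- ===== PORT A =====
-- loop of A: append int(p)-1 to out; `none` = the ValueError branches
def pvALoop : List Int → List Int → Option (List Int)
  | [], out => some out
  | p :: rest, out => if 1 ≤ p ∧ p ≤ 8 then pvALoop rest (out ++ [p - 1]) else none

def parse_human_players_py (players : List Int) : List Int :=
  match pvALoop players [] with
  | some out => PySem.List.sorted (PySem.Set.ofList out) (fun x => x) false
  | none => []

-- ===== PORT B =====
-- B's validation pass: accumulates nothing; `false` = the ValueError branches
def pvBValid : List Int → Bool
  | [] => true
  | p :: rest => if 1 ≤ p ∧ p ≤ 8 then pvBValid rest else false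

def parse_human_players_py_alt (players : List Int) : List Int :=
  if pvBValid players then
    ((PySem.List.pyRange 1 9 1).filter (fun v => decide (v ∈ players))).map (fun v => v - 1)
  else []

-- ===== PRECONDITION & SPEC =====
-- Pre_: exactly the inputs on which Python A returns (every element in 1..8); elsewhere A raises ValueError.
def Pre_parse_human_players_py (players : List Int) : Prop := ∀ p ∈ players, 1 ≤ p ∧ p ≤ 8
instance (players : List Int) : Decidable (Pre_parse_human_players_py players) := by unfold Pre_parse_human_players_py; infer_instance
def pvWitness_parse_human_players_py : List Int := [3, 1, 3, 8]

def Spec_parse_human_players_py (players : List Int) (out : List Int) : Prop := out = parse_human_players_py_alt players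
instance (players : List Int) (out : List Int) : Decidable (Spec_parse_human_players_py players out) := by unfold Spec_parse_human_players_py; infer_instance

-- ===== CLAIM (what is proved, stated in full; the proofs are below) =====
def Claim_equal_parse_human_players_py : Prop := ∀ (players : List Int), Dom_parse_human_players_py players → Pre_parse_human_players_py players → Spec_parse_human_players_py players (parse_human_players_py players)

-- ===== LEMMAS AND PROOFS =====

theorem pvALoop_eq (players : List Int) (h : ∀ p ∈ players, 1 ≤ p ∧ p ≤ 8) :
    ∀ out, pvALoop players out = some (out ++ players.map (fun p => p - 1)) := by
  induction players with
  | nil => intro out; simp [pvALoop]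
  | cons p rest ih =>
      intro out
      have hp := h p (by simp)
      simp [pvALoop, hp, ih (fun q hq => h q (by simp [hq]))]

theorem pvBValid_true (players : List Int) (h : ∀ p ∈ players, 1 ≤ p ∧ p ≤ 8) :
    pvBValid players = true := by
  induction players with
  | nil => rfl
  | cons p rest ih =>
      have hp := h p (by simp)
      simp [pvBValid, hp, ih (fun q hq => h q (by simp [hq]))]

theorem pvRange18 : PySem.List.pyRange 1 9 1 = [1, 2, 3, 4, 5, 6, 7, 8] := by decide

theorem pvAB_eq (players : List Int) (h : ∀ p ∈ players, 1 ≤ p ∧ p ≤ 8) :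
    parse_human_players_py players = parse_human_players_py_alt players := by
  unfold parse_human_players_py parse_human_players_py_alt
  rw [pvALoop_eq players h [], pvBValid_true players h, pvRange18]
  simp only [List.nil_append, if_pos]
  set L := players.map (fun p => p - 1) with hL
  set R := (([1, 2, 3, 4, 5, 6, 7, 8] : List Int).filter
      (fun v => decide (v ∈ players))).map (fun v => v - 1) with hR
  have hnodupR : R.Nodup := by
    refine (List.Nodup.filter _ (by decide)).map ?_
    intro a b hab
    simp only at hab
    omega
  apply PySem.List.sorted_eq_of_perm_of_pairwise_lt
  · rw [List.perm_ext_iff_of_nodup hnodupR (PySem.Set.nodup_ofList _)]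
    intro x
    rw [PySem.Set.mem_ofList]
    constructor
    · intro hx
      obtain ⟨v, hv, hvx⟩ := List.mem_map.mp hx
      have hvp : v ∈ players := by
        have := List.mem_filter.mp hv
        simpa using this.2
      rw [hL]
      exact List.mem_map.mpr ⟨v, hvp, hvx⟩
    · intro hx
      rw [hL] at hx
      obtain ⟨p, hp, hpx⟩ := List.mem_map.mp hx
      have hpb := h p hp
      refine List.mem_map.mpr ⟨p, List.mem_filter.mpr ⟨?_, by simpa using hp⟩, hpx⟩
      simp only [List.mem_cons]
      omega
  · have hfil : (([1, 2, 3, 4, 5, 6, 7, 8] : List Int).filter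
        (fun v => decide (v ∈ players))).Pairwise (· < ·) :=
      List.Pairwise.filter _ (by decide)
    refine List.Pairwise.map _ ?_ hfil
    intro a b hab
    simp only at hab ⊢
    omega

-- ===== VERDICT (by name: the statement is the Claim_ definition above) =====
theorem parse_human_players_py_spec : Claim_equal_parse_human_players_py := by
  intro players _ hpre
  unfold Spec_parse_human_players_py
  exact pvAB_eq players hpre
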